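-- pv_equiv track=rewrite | github.com/marat-/python-reporting-services | xlsx_rc_convertor.py | col2str
-- ===== SOURCE A (Python) =====
-- def col2str(num, run=0):
--     """ Converts column number to literal format (eg. 27 = 'AA') """
--     if run:
--         inum = num
--         res = ''
--
--         while inum > 0:
--             buf = (inum - 1) % 26
--             res += chr(buf + 65)
--             inum = int((inum - buf) / 26)
--         res = res[::-1]
--     else:
--         res = num
--
--     return res
-- ===== SOURCE B (Python) =====
-- def _col(n):
--     """Recursive base-26 bijective conversion, building the string high digit first."""
--     if n <= 0:
--         return ''
--     return _col((n - 1) // 26) + chr((n - 1) % 26 + 65)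
--
--
-- def col2str(num, run=0):
--     """ Converts column number to literal format (eg. 27 = 'AA') """
--     if run:
--         res = _col(num)
--     else:
--         res = num
--     return res
-- ===== Notes on version B (the rewrite author's own statement) =====
-- stated objective: alternative
-- what changed: Replaced the while-loop with string accumulator plus final [::-1] reversal by a recursive helper that recurses on (n-1)//26 and appends the low digit, so no reversal is needed.
-- outside the precondition, e.g. on col2str(5, 0): A returns 5, B returns 5
import Mathlib
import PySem

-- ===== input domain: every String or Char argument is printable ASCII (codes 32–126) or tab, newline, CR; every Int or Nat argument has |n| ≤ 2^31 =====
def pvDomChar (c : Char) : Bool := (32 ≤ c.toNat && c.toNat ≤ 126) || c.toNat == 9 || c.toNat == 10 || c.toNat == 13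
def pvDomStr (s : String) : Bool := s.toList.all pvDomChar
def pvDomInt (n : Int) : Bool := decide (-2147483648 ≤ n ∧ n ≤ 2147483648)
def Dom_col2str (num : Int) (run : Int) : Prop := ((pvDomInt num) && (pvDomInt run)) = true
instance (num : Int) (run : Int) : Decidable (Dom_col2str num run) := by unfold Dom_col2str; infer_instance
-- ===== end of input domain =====

-- B replaces A's while-loop + final [::-1] reversal by a recursive helper that
-- recurses on (n-1)//26 and appends the low digit, so no reversal is needed (alternative decomposition).

-- ===== PORT A =====
-- the while-loop: state is (inum, res); 'int((inum - buf)/26)' is ported as floor division,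
-- exact here because inum - buf > 0 inside the loop (truncation = floor on positive values)
def col2strLoop (inum : Int) (res : List Char) : List Char :=
  if 0 < inum then
    let buf := PySem.Int.mod (inum - 1) 26
    col2strLoop (PySem.Int.floordiv (inum - buf) 26) (res ++ [Char.ofNat (buf + 65).toNat])
  else res
termination_by inum.toNat
decreasing_by
  rename_i h
  rw [PySem.Int.mod_eq_emod_of_pos (by norm_num), PySem.Int.floordiv_eq_ediv_of_pos (by norm_num)]
  omega

-- run = 0 is excluded by Pre_ (Python returns the int num there, not a str);
-- res[::-1] is List.reverse (PySem.List.slice?_none_none_neg_one)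
def col2str (num : Int) (run : Int) : String :=
  if run ≠ 0 then String.ofList ((col2strLoop num []).reverse)
  else PySem.Int.toStr num

-- ===== PORT B =====
def colRec (n : Int) : List Char :=
  if n ≤ 0 then []
  else colRec (PySem.Int.floordiv (n - 1) 26) ++ [Char.ofNat (PySem.Int.mod (n - 1) 26 + 65).toNat]
termination_by n.toNat
decreasing_by
  rename_i h
  rw [PySem.Int.floordiv_eq_ediv_of_pos (by norm_num)]
  omega

def col2str_alt (num : Int) (run : Int) : String :=
  if run ≠ 0 then String.ofList (colRec num)
  else PySem.Int.toStr num

-- ===== PRECONDITION & SPEC =====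
-- Pre_ excludes run = 0, where Python A (and B) return the int num itself, not a value of type str.
def Pre_col2str (num : Int) (run : Int) : Prop := run ≠ 0
instance (num : Int) (run : Int) : Decidable (Pre_col2str num run) := by unfold Pre_col2str; infer_instance
def pvWitness_col2str : Int × Int := (27, 1)

def Spec_col2str (num : Int) (run : Int) (out : String) : Prop := out = col2str_alt num run
instance (num : Int) (run : Int) (out : String) : Decidable (Spec_col2str num run out) := by unfold Spec_col2str; infer_instance

-- ===== CLAIM (what is proved, stated in full; the proofs are below) =====
def Claim_equal_col2str : Prop := ∀ (num : Int) (run : Int), Dom_col2str num run → Pre_col2str num run → Spec_col2str num run (col2str num run)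

-- ===== LEMMAS AND PROOFS =====

-- inside the loop, A's next state (inum - buf)/26 equals B's (inum - 1)//26
lemma col2str_step_eq (n : Int) :
    PySem.Int.floordiv (n - PySem.Int.mod (n - 1) 26) 26 = PySem.Int.floordiv (n - 1) 26 := by
  rw [PySem.Int.mod_eq_emod_of_pos (by norm_num),
     PySem.Int.floordiv_eq_ediv_of_pos (by norm_num),
     PySem.Int.floordiv_eq_ediv_of_pos (by norm_num)]
  omega

-- the accumulator of A's loop factors out
lemma col2strLoop_acc (n : Int) (res : List Char) :
    col2strLoop n res = res ++ col2strLoop n [] := by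
  have H : ∀ k (n : Int), n.toNat = k → ∀ res, col2strLoop n res = res ++ col2strLoop n [] := by
    intro k
    induction k using Nat.strong_induction_on with
    | _ k ih =>
      intro n hk res
      by_cases h : 0 < n
      · have hlt : (PySem.Int.floordiv (n - PySem.Int.mod (n - 1) 26) 26).toNat < k := by
          rw [col2str_step_eq, PySem.Int.floordiv_eq_ediv_of_pos (by norm_num)]
          omega
        conv_lhs => rw [col2strLoop]
        conv_rhs => rw [col2strLoop]
        rw [if_pos h, if_pos h]
        dsimp only
        rw [ih _ hlt _ rfl, ih _ hlt _ rfl ([] ++ _)]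
        simp
      · conv_lhs => rw [col2strLoop]
        conv_rhs => rw [col2strLoop]
        rw [if_neg h, if_neg h]
        simp
  exact H n.toNat n rfl res

-- A's loop result, reversed, is B's recursion
lemma col2strLoop_reverse (n : Int) : (col2strLoop n []).reverse = colRec n := by
  have H : ∀ k (n : Int), n.toNat = k → (col2strLoop n []).reverse = colRec n := by
    intro k
    induction k using Nat.strong_induction_on with
    | _ k ih =>
      intro n hk
      rw [col2strLoop, colRec]
      by_cases h : 0 < n
      · have hlt : (PySem.Int.floordiv (n - 1) 26).toNat < k := by
          rw [PySem.Int.floordiv_eq_ediv_of_pos (by norm_num)]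
          omega
        have hrec := ih _ hlt _ rfl
        rw [if_pos h, if_neg (by omega : ¬ n ≤ 0)]
        dsimp only
        rw [col2str_step_eq, col2strLoop_acc]
        simp only [List.nil_append, List.reverse_append, List.reverse_cons, List.reverse_nil,
          hrec]
      · rw [if_neg h, if_pos (by omega : n ≤ 0)]
        simp
  exact H n.toNat n rfl

-- ===== VERDICT (by name: the statement is the Claim_ definition above) =====
theorem col2str_spec : Claim_equal_col2str := by
  intro num run _ hpre
  unfold Pre_col2str at hpre
  unfold Spec_col2str col2str col2str_alt
  rw [if_pos hpre, if_pos hpre, col2strLoop_reverse]
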